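-- pv_equiv track=rewrite | github.com/Yi-Kyu/AutoEnum | autoenum_1.0.0/autoenum/modules/os_detection.py | detect_os_by_open_ports
-- ===== SOURCE A (Python) =====
-- def detect_os_by_open_ports(ports):
--     """Detecta el sistema operativo basado en puertos abiertos"""
--     if not ports:
--         return None
--
--     # Puertos comunes por sistema operativo
--     windows_ports = [135, 139, 445, 3389]
--     linux_ports = [22, 111, 2049]
--     network_device_ports = [23, 161, 162, 8291, 8728, 8729]
--
--     # Contar coincidencias
--     windows_count = sum(1 for p in ports if p in windows_ports)
--     linux_count = sum(1 for p in ports if p in linux_ports)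
--     network_count = sum(1 for p in ports if p in network_device_ports)
--
--     # Determinar OS basado en coincidencias
--     if windows_count > linux_count and windows_count > network_count:
--         confidence = min(windows_count * 20, 80)
--         return {
--             "name": "Windows",
--             "confidence": f"{confidence}%",
--             "method": "Open Ports"
--         }
--     elif linux_count > windows_count and linux_count > network_count:
--         confidence = min(linux_count * 20, 80)
--         return {
--             "name": "Linux/Unix",
--             "confidence": f"{confidence}%",
--             "method": "Open Ports"
--         }
--     elif network_count > windows_count and network_count > linux_count:
--         confidence = min(network_count * 20, 80)
--         return {
--             "name": "Network Device",
--             "confidence": f"{confidence}%",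
--             "method": "Open Ports"
--         }
--     else:
--         return {
--             "name": "Unknown",
--             "confidence": "0%",
--             "method": "Open Ports"
--         }
-- ===== SOURCE B (Python) =====
-- _PORT_CATEGORY = {
--     135: "windows", 139: "windows", 445: "windows", 3389: "windows",
--     22: "linux", 111: "linux", 2049: "linux",
--     23: "network", 161: "network", 162: "network",
--     8291: "network", 8728: "network", 8729: "network",
-- }
--
-- def detect_os_by_open_ports(ports):
--     if not ports:
--         return None
--     windows_count = linux_count = network_count = 0
--     for p in ports:
--         cat = _PORT_CATEGORY.get(p)
--         if cat == "windows":
--             windows_count += 1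
--         elif cat == "linux":
--             linux_count += 1
--         elif cat == "network":
--             network_count += 1
--     if windows_count > linux_count and windows_count > network_count:
--         name, confidence = "Windows", min(windows_count * 20, 80)
--     elif linux_count > windows_count and linux_count > network_count:
--         name, confidence = "Linux/Unix", min(linux_count * 20, 80)
--     elif network_count > windows_count and network_count > linux_count:
--         name, confidence = "Network Device", min(network_count * 20, 80)
--     else:
--         name, confidence = "Unknown", 0
--     return {"name": name, "confidence": f"{confidence}%", "method": "Open Ports"}
-- ===== Notes on version B (the rewrite author's own statement) =====
-- stated objective: faster
-- what changed: Replaces the three separate membership-scanning passes over ports with a single port->category dict built once and ONE counting pass, then a shared result-construction step instead of three duplicated return blocks.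
import Mathlib
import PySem

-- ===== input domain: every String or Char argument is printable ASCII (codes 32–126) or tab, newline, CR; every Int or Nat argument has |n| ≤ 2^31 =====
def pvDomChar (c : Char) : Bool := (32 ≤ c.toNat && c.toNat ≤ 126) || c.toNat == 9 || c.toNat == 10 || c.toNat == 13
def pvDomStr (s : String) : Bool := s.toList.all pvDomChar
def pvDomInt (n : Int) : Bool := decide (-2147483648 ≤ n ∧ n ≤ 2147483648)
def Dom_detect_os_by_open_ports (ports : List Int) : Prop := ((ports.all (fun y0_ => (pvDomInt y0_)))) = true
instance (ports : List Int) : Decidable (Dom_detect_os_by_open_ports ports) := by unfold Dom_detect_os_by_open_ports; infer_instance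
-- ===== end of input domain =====

-- B replaces A's three membership-scanning passes with one port->category dict and a single counting pass (alternative decomposition, same results).


-- ===== PORT A =====
def detect_os_by_open_ports (ports : List Int) : Option (List (String × String)) :=
  if ports = [] then none
  else
    let windows_ports : List Int := [135, 139, 445, 3389]
    let linux_ports : List Int := [22, 111, 2049]
    let network_device_ports : List Int := [23, 161, 162, 8291, 8728, 8729]
    let windows_count : Int := ports.foldl (fun acc p => if p ∈ windows_ports then acc + 1 else acc) 0
    let linux_count : Int := ports.foldl (fun acc p => if p ∈ linux_ports then acc + 1 else acc) 0
    let network_count : Int := ports.foldl (fun acc p => if p ∈ network_device_ports then acc + 1 else acc) 0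
    if windows_count > linux_count ∧ windows_count > network_count then
      some [("name", "Windows"), ("confidence", PySem.Int.toStr (min (windows_count * 20) 80) ++ "%"), ("method", "Open Ports")]
    else if linux_count > windows_count ∧ linux_count > network_count then
      some [("name", "Linux/Unix"), ("confidence", PySem.Int.toStr (min (linux_count * 20) 80) ++ "%"), ("method", "Open Ports")]
    else if network_count > windows_count ∧ network_count > linux_count then
      some [("name", "Network Device"), ("confidence", PySem.Int.toStr (min (network_count * 20) 80) ++ "%"), ("method", "Open Ports")]
    else
      some [("name", "Unknown"), ("confidence", "0%"), ("method", "Open Ports")]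

-- ===== PORT B =====
def pvPortCategory : PySem.Dict Int String :=
  PySem.Dict.ofList [(135, "windows"), (139, "windows"), (445, "windows"), (3389, "windows"),
    (22, "linux"), (111, "linux"), (2049, "linux"),
    (23, "network"), (161, "network"), (162, "network"),
    (8291, "network"), (8728, "network"), (8729, "network")]

def pvStep (acc : Int × Int × Int) (p : Int) : Int × Int × Int :=
  match pvPortCategory.get? p with
  | some "windows" => (acc.1 + 1, acc.2.1, acc.2.2)
  | some "linux" => (acc.1, acc.2.1 + 1, acc.2.2)
  | some "network" => (acc.1, acc.2.1, acc.2.2 + 1)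
  | _ => acc

def detect_os_by_open_ports_alt (ports : List Int) : Option (List (String × String)) :=
  if ports = [] then none
  else
    let counts := ports.foldl pvStep (0, 0, 0)
    let windows_count := counts.1
    let linux_count := counts.2.1
    let network_count := counts.2.2
    let nc : String × Int :=
      if windows_count > linux_count ∧ windows_count > network_count then
        ("Windows", min (windows_count * 20) 80)
      else if linux_count > windows_count ∧ linux_count > network_count then
        ("Linux/Unix", min (linux_count * 20) 80)
      else if network_count > windows_count ∧ network_count > linux_count then
        ("Network Device", min (network_count * 20) 80)
      else
        ("Unknown", 0)
    some [("name", nc.1), ("confidence", PySem.Int.toStr nc.2 ++ "%"), ("method", "Open Ports")]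

-- ===== PRECONDITION & SPEC =====
def Spec_detect_os_by_open_ports (ports : List Int) (out : Option (List (String × String))) : Prop := out = detect_os_by_open_ports_alt ports
instance (ports : List Int) (out : Option (List (String × String))) : Decidable (Spec_detect_os_by_open_ports ports out) := by unfold Spec_detect_os_by_open_ports; infer_instance

-- ===== CLAIM (what is proved, stated in full; the proofs are below) =====
def Claim_equal_detect_os_by_open_ports : Prop := ∀ (ports : List Int), Dom_detect_os_by_open_ports ports → Spec_detect_os_by_open_ports ports (detect_os_by_open_ports ports)

-- ===== LEMMAS AND PROOFS =====

-- The literal dict built by ofList, written as its underlying association list.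
lemma pvPortCategory_eq : pvPortCategory = PySem.Dict.mk [(135, "windows"), (139, "windows"), (445, "windows"), (3389, "windows"),
    (22, "linux"), (111, "linux"), (2049, "linux"),
    (23, "network"), (161, "network"), (162, "network"),
    (8291, "network"), (8728, "network"), (8729, "network")] := by decide

-- One B-step updates the triple exactly as A's three membership tests would.
set_option maxHeartbeats 1600000 in
lemma pvStep_eq (acc : Int × Int × Int) (p : Int) :
    pvStep acc p =
      ((if p ∈ ([135, 139, 445, 3389] : List Int) then acc.1 + 1 else acc.1),
       (if p ∈ ([22, 111, 2049] : List Int) then acc.2.1 + 1 else acc.2.1),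
       (if p ∈ ([23, 161, 162, 8291, 8728, 8729] : List Int) then acc.2.2 + 1 else acc.2.2)) := by
  obtain ⟨w, l, n⟩ := acc
  by_cases hp : p ∈ ([135, 139, 445, 3389, 22, 111, 2049, 23, 161, 162, 8291, 8728, 8729] : List Int)
  · simp only [List.mem_cons, List.not_mem_nil, or_false] at hp
    rcases hp with rfl | rfl | rfl | rfl | rfl | rfl | rfl | rfl | rfl | rfl | rfl | rfl | rfl <;> rfl
  · simp only [List.mem_cons, List.not_mem_nil, or_false, not_or] at hp
    obtain ⟨h1, h2, h3, h4, h5, h6, h7, h8, h9, h10, h11, h12, h13⟩ := hp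
    have e1 : ((135:Int) == p) = false := by simp [Ne.symm h1]
    have e2 : ((139:Int) == p) = false := by simp [Ne.symm h2]
    have e3 : ((445:Int) == p) = false := by simp [Ne.symm h3]
    have e4 : ((3389:Int) == p) = false := by simp [Ne.symm h4]
    have e5 : ((22:Int) == p) = false := by simp [Ne.symm h5]
    have e6 : ((111:Int) == p) = false := by simp [Ne.symm h6]
    have e7 : ((2049:Int) == p) = false := by simp [Ne.symm h7]
    have e8 : ((23:Int) == p) = false := by simp [Ne.symm h8]
    have e9 : ((161:Int) == p) = false := by simp [Ne.symm h9]
    have e10 : ((162:Int) == p) = false := by simp [Ne.symm h10]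
    have e11 : ((8291:Int) == p) = false := by simp [Ne.symm h11]
    have e12 : ((8728:Int) == p) = false := by simp [Ne.symm h12]
    have e13 : ((8729:Int) == p) = false := by simp [Ne.symm h13]
    simp only [pvStep, pvPortCategory_eq, PySem.Dict.get?, List.find?, Option.map,
      e1, e2, e3, e4, e5, e6, e7, e8, e9, e10, e11, e12, e13]
    simp [h1, h2, h3, h4, h5, h6, h7, h8, h9, h10, h11, h12, h13]

-- B's single fold computes the same triple as A's three folds.
lemma fold_counts (ports : List Int) (acc : Int × Int × Int) :
    ports.foldl pvStep acc =
      (ports.foldl (fun a p => if p ∈ ([135, 139, 445, 3389] : List Int) then a + 1 else a) acc.1,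
       ports.foldl (fun a p => if p ∈ ([22, 111, 2049] : List Int) then a + 1 else a) acc.2.1,
       ports.foldl (fun a p => if p ∈ ([23, 161, 162, 8291, 8728, 8729] : List Int) then a + 1 else a) acc.2.2) := by
  induction ports generalizing acc with
  | nil => rfl
  | cons p ps ih => simp only [List.foldl_cons, ih, pvStep_eq]

-- ===== VERDICT (by name: the statement is the Claim_ definition above) =====
theorem detect_os_by_open_ports_spec : Claim_equal_detect_os_by_open_ports := by
  intro ports _
  unfold Spec_detect_os_by_open_ports detect_os_by_open_ports detect_os_by_open_ports_alt
  by_cases h : ports = []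
  · simp [h]
  · simp only [h, if_false, fold_counts]
    split_ifs <;> simp_all
    decide
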